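-- pv_equiv track=rewrite | github.com/aviral-garg/Algorithms | 1_Sorting/practice/LexicographicalOrder.py | lexicographical_order
-- ===== SOURCE A (Python) =====
-- def lexicographical_order(arr):
--     hm1 = {}
--     hm2 = {}
--
--     for e in arr:
--         key = e.split(" ")[0]
--         value = e.split(" ")[1]
--
--         if hm1.get(key) == None:
--             hm1[key] = 1
--             hm2[key] = value
--         else:
--             hm1[key] += 1
--             hm2[key] = value if hm2[key] < value else hm2[key]
--
--     res = []
--     for k, v in hm1.items():
--         res.append(k + ":" + str(v) + "," + hm2[k])
--
--     return res
-- ===== SOURCE B (Python) =====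
-- def lexicographical_order(arr):
--     groups = {}
--     for e in arr:
--         parts = e.split(" ")
--         groups.setdefault(parts[0], []).append(parts[1])
--     return [k + ":" + str(len(vs)) + "," + max(vs) for k, vs in groups.items()]
-- ===== Notes on version B (the rewrite author's own statement) =====
-- stated objective: idiomatic
-- what changed: B replaces A's two parallel dicts of running aggregates (count and running max, updated inside the scan) by one grouping dict built with setdefault (first token -> list of second tokens) and a separate aggregation pass computing len and max per group.
import Mathlib
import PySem

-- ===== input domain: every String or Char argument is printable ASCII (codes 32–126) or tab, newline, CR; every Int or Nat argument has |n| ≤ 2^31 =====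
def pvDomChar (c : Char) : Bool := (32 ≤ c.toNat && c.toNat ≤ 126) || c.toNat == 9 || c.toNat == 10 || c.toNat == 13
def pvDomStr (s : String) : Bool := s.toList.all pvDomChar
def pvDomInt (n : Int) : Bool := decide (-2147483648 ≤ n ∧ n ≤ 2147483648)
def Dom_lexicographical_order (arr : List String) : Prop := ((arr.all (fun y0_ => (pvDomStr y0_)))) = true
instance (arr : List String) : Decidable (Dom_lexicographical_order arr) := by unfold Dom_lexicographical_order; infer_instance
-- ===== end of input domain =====

-- B builds one grouping dict (first token ↦ list of second tokens) in a single pass and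
-- aggregates count/max in a second pass over the groups, instead of A's two parallel dicts
-- of running aggregates; objective: simpler/idiomatic, same return value.

-- ===== PORT A =====
-- loop body of A's first 'for' loop, kept as a named helper
def pvAStep (st : PySem.Dict String Int × PySem.Dict String String) (e : String) :
    PySem.Dict String Int × PySem.Dict String String :=
  let key := (PySem.List.pyGet? ((PySem.Str.split? e " ").getD []) 0).getD ""
  -- e.split(" ")[1]: pyGet? = none is Python's IndexError, excluded by Pre_ (e contains a space)
  let value := (PySem.List.pyGet? ((PySem.Str.split? e " ").getD []) 1).getD ""
  match st.1.get? key with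
  | none => (st.1.insert key 1, st.2.insert key value)
  | some c =>
      let old := (st.2.get? key).getD ""
      (st.1.insert key (c + 1), st.2.insert key (if old < value then value else old))

def lexicographical_order (arr : List String) : List String :=
  let hm := arr.foldl pvAStep (PySem.Dict.empty, PySem.Dict.empty)
  hm.1.items.foldl
    (fun res kv => res ++ [kv.1 ++ ":" ++ PySem.Int.toStr kv.2 ++ "," ++ (hm.2.get? kv.1).getD ""]) []

-- ===== PORT B =====
-- loop body of B's grouping loop: groups.setdefault(parts[0], []).append(parts[1])
def pvBStep (g : PySem.Dict String (List String)) (e : String) : PySem.Dict String (List String) :=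
  let parts := (PySem.Str.split? e " ").getD []
  -- parts[1]: pyGet? = none is Python's IndexError, excluded by Pre_ (e contains a space)
  g.modify ((PySem.List.pyGet? parts 0).getD "") [] (· ++ [(PySem.List.pyGet? parts 1).getD ""])

def lexicographical_order_alt (arr : List String) : List String :=
  (arr.foldl pvBStep PySem.Dict.empty).items.map
    (fun kv => kv.1 ++ ":" ++ PySem.Int.toStr (kv.2.length : Int) ++ ","
                 ++ (PySem.List.max? kv.2 (fun x => x)).getD "")

-- ===== PRECONDITION & SPEC =====
-- Pre_ excludes only inputs where Python A RAISES IndexError (an element with no space;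
-- B raises there identically).
def Pre_lexicographical_order (arr : List String) : Prop :=
  ∀ e ∈ arr, PySem.Str.isIn " " e = true
instance (arr : List String) : Decidable (Pre_lexicographical_order arr) := by
  unfold Pre_lexicographical_order; infer_instance
def pvWitness_lexicographical_order : List String := ["bcdef afcd", "abcd fghij", "bcdef usyrj"]

def Spec_lexicographical_order (arr : List String) (out : List String) : Prop :=
  out = lexicographical_order_alt arr
instance (arr : List String) (out : List String) : Decidable (Spec_lexicographical_order arr out) := by
  unfold Spec_lexicographical_order; infer_instance

-- ===== CLAIM (what is proved, stated in full; the proofs are below) =====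
def Claim_equal_lexicographical_order : Prop := ∀ (arr : List String), Dom_lexicographical_order arr → Pre_lexicographical_order arr → Spec_lexicographical_order arr (lexicographical_order arr)

-- ===== LEMMAS AND PROOFS =====

-- running max of a nonempty list of strings, as A maintains it ("" for the unused empty case)
def pvFmax : List String → String
  | [] => ""
  | h :: t => t.foldl max h

-- the invariant tying B's grouping dict to A's two dicts of running aggregates
def pvInv (g : PySem.Dict String (List String))
    (d1 : PySem.Dict String Int) (d2 : PySem.Dict String String) : Prop :=
  d1.items = g.items.map (fun p => (p.1, (p.2.length : Int))) ∧
  d2.items = g.items.map (fun p => (p.1, pvFmax p.2)) ∧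
  g.keys.Nodup

lemma pv_empty_le (v : String) : ("" : String) ≤ v := by
  rw [String.le_iff_toList_le]
  cases v.toList with
  | nil => exact le_refl _
  | cons h t => exact le_of_lt (List.nil_lt_cons h t)

lemma pv_ite_max' (a b : String) : (if a.toList < b.toList then b else a) = max a b := by
  rcases le_or_gt b a with h | h
  · have : ¬ a.toList < b.toList := by
      rw [← String.lt_iff_toList_lt]; exact not_lt.mpr h
    simp [this, max_eq_left h]
  · have : a.toList < b.toList := by rw [← String.lt_iff_toList_lt]; exact h
    simp [this, max_eq_right h.le]

lemma pv_fmax_append (vs : List String) (v : String) :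
    pvFmax (vs ++ [v]) = max (pvFmax vs) v := by
  cases vs with
  | nil => simp [pvFmax, max_eq_right (pv_empty_le v)]
  | cons h t => simp [pvFmax, List.foldl_append]

lemma pv_maxD_eq_fmax (vs : List String) :
    (PySem.List.max? vs (fun x => x)).getD "" = pvFmax vs := by
  cases vs with
  | nil => rfl
  | cons h t => rw [PySem.List.max?_id_cons]; rfl

-- lookups transfer through a value-wise map of the items list
lemma pv_get?_map {ν ν' : Type} (f : ν → ν') (l : List (String × ν)) (k : String) :
    (PySem.Dict.mk (l.map (fun p => (p.1, f p.2)))).get? k =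
      ((PySem.Dict.mk l).get? k).map f := by
  induction l with
  | nil => rfl
  | cons p t ih =>
      obtain ⟨pk, pv⟩ := p
      simp only [List.map_cons, PySem.Dict.get?_mk_cons]
      split <;> simp [ih]

lemma pv_get?_of_rel {ν ν' : Type} (g : PySem.Dict String ν) (d : PySem.Dict String ν')
    (f : ν → ν') (h : d.items = g.items.map (fun p => (p.1, f p.2))) (k : String) :
    d.get? k = (g.get? k).map f := by
  obtain ⟨l⟩ := g; obtain ⟨l'⟩ := d
  subst h
  exact pv_get?_map f l k

lemma pv_contains_of_rel {ν ν' : Type} (g : PySem.Dict String ν) (d : PySem.Dict String ν')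
    (f : ν → ν') (h : d.items = g.items.map (fun p => (p.1, f p.2))) (k : String) :
    d.contains k = g.contains k := by
  rw [PySem.Dict.contains_eq_isSome_get?, PySem.Dict.contains_eq_isSome_get?,
    pv_get?_of_rel g d f h k]
  cases g.get? k <;> rfl

lemma pv_step_core (g : PySem.Dict String (List String)) (d1 : PySem.Dict String Int)
    (d2 : PySem.Dict String String) (h : pvInv g d1 d2) (k v : String) :
    pvInv (g.modify k [] (· ++ [v]))
      (match d1.get? k with
       | none => (d1.insert k 1, d2.insert k v)
       | some c => (d1.insert k (c + 1),
           d2.insert k (if (d2.get? k).getD "" < v then v else (d2.get? k).getD ""))).1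
      (match d1.get? k with
       | none => (d1.insert k 1, d2.insert k v)
       | some c => (d1.insert k (c + 1),
           d2.insert k (if (d2.get? k).getD "" < v then v else (d2.get? k).getD ""))).2 := by
  obtain ⟨h1, h2, hnd⟩ := h
  have hmod : g.modify k [] (· ++ [v]) = g.insert k (g.getD k [] ++ [v]) := rfl
  have hget1 : d1.get? k = (g.get? k).map (fun vs => ((vs.length : Nat) : Int)) :=
    pv_get?_of_rel g d1 _ h1 k
  have hget2 : d2.get? k = (g.get? k).map pvFmax :=
    pv_get?_of_rel g d2 _ h2 k
  have hcont1 : d1.contains k = g.contains k :=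
    pv_contains_of_rel g d1 (fun vs => ((vs.length : Nat) : Int)) h1 k
  have hcont2 : d2.contains k = g.contains k := pv_contains_of_rel g d2 pvFmax h2 k
  cases hgk : g.get? k with
  | none =>
      -- new key: every dict appends its entry
      have hgc : g.contains k = false := by
        rw [PySem.Dict.contains_eq_isSome_get?, hgk]; rfl
      have hd1 : d1.get? k = none := by rw [hget1, hgk]; rfl
      have hgd : g.getD k [] = [] := by rw [PySem.Dict.getD_eq_get?_getD, hgk]; rfl
      refine ⟨?_, ?_, ?_⟩
      · simp only [hd1, hmod, hgd]
        rw [PySem.Dict.items_insert_of_not_contains _ _ hgc,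
          PySem.Dict.items_insert_of_not_contains _ _ (hcont1.trans hgc), h1]
        simp
      · simp only [hd1, hmod, hgd]
        rw [PySem.Dict.items_insert_of_not_contains _ _ hgc,
          PySem.Dict.items_insert_of_not_contains _ _ (hcont2.trans hgc), h2]
        simp [pvFmax]
      · rw [hmod]; exact PySem.Dict.nodup_keys_insert _ _ _ hnd
  | some vs =>
      -- seen key: every dict overwrites its entry in place
      have hgc : g.contains k = true := by
        rw [PySem.Dict.contains_eq_isSome_get?, hgk]; rfl
      have hd1 : d1.get? k = some ((vs.length : Nat) : Int) := by rw [hget1, hgk]; rfl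
      have hd2 : d2.get? k = some (pvFmax vs) := by rw [hget2, hgk]; rfl
      have hgd : g.getD k [] = vs := by rw [PySem.Dict.getD_eq_get?_getD, hgk]; rfl
      have hmem : ∀ p ∈ g.items, (p.1 == k) = true → p.2 = vs := by
        intro p hp hpk
        have hk' : p.1 = k := by simpa using hpk
        have hp' : (p.1, p.2) ∈ g.items := by simpa using hp
        have hsome : g.get? p.1 = some p.2 := PySem.Dict.get?_of_mem_items g hp' hnd
        rw [hk', hgk] at hsome
        exact (Option.some_inj.mp hsome).symm
      refine ⟨?_, ?_, ?_⟩
      · simp only [hd1, hmod, hgd]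
        rw [PySem.Dict.items_insert_of_contains _ _ hgc,
          PySem.Dict.items_insert_of_contains _ _ (hcont1.trans hgc), h1,
          List.map_map, List.map_map]
        refine List.map_congr_left (fun p hp => ?_)
        by_cases hpk : (p.1 == k) = true
        · simp only [Function.comp, hpk]
          rw [hmem p hp hpk]; simp
        · simp [Function.comp, hpk]
      · simp only [hd1, hd2, hmod, hgd, Option.getD_some]
        rw [PySem.Dict.items_insert_of_contains _ _ hgc,
          PySem.Dict.items_insert_of_contains _ _ (hcont2.trans hgc), h2,
          List.map_map, List.map_map]
        refine List.map_congr_left (fun p hp => ?_)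
        by_cases hpk : (p.1 == k) = true
        · simp only [Function.comp, hpk]
          rw [hmem p hp hpk]
          simp [pv_fmax_append, pv_ite_max']
        · simp [Function.comp, hpk]
      · rw [hmod]; exact PySem.Dict.nodup_keys_insert _ _ _ hnd

lemma pv_step_inv (g : PySem.Dict String (List String)) (d1 : PySem.Dict String Int)
    (d2 : PySem.Dict String String) (h : pvInv g d1 d2) (e : String) :
    pvInv (pvBStep g e) (pvAStep (d1, d2) e).1 (pvAStep (d1, d2) e).2 :=
  pv_step_core g d1 d2 h
    ((PySem.List.pyGet? ((PySem.Str.split? e " ").getD []) 0).getD "")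
    ((PySem.List.pyGet? ((PySem.Str.split? e " ").getD []) 1).getD "")

lemma pv_loop_inv (arr : List String) :
    ∀ (g : PySem.Dict String (List String)) (d1 : PySem.Dict String Int)
      (d2 : PySem.Dict String String), pvInv g d1 d2 →
      pvInv (arr.foldl pvBStep g) (arr.foldl pvAStep (d1, d2)).1
        (arr.foldl pvAStep (d1, d2)).2 := by
  induction arr with
  | nil => intro g d1 d2 h; exact h
  | cons e t ih =>
      intro g d1 d2 h
      have hstep := pv_step_inv g d1 d2 h e
      simpa using ih (pvBStep g e) (pvAStep (d1, d2) e).1 (pvAStep (d1, d2) e).2 hstep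

-- ===== VERDICT (by name: the statement is the Claim_ definition above) =====
theorem lexicographical_order_spec : Claim_equal_lexicographical_order := by
  intro arr _ _
  unfold Spec_lexicographical_order lexicographical_order lexicographical_order_alt
  have hinv : pvInv (arr.foldl pvBStep PySem.Dict.empty)
      (arr.foldl pvAStep (PySem.Dict.empty, PySem.Dict.empty)).1
      (arr.foldl pvAStep (PySem.Dict.empty, PySem.Dict.empty)).2 :=
    pv_loop_inv arr PySem.Dict.empty PySem.Dict.empty PySem.Dict.empty ⟨rfl, rfl, List.nodup_nil⟩
  obtain ⟨h1, h2, hnd⟩ := hinv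
  set g := arr.foldl pvBStep PySem.Dict.empty with hg
  set st := arr.foldl pvAStep (PySem.Dict.empty, PySem.Dict.empty) with hst
  show st.1.items.foldl
      (fun res kv => res ++ [kv.1 ++ ":" ++ PySem.Int.toStr kv.2 ++ "," ++ (st.2.get? kv.1).getD ""]) [] = _
  refine (PySem.List.foldl_append_singleton_eq_map
      (fun kv : String × Int =>
        kv.1 ++ ":" ++ PySem.Int.toStr kv.2 ++ "," ++ (st.2.get? kv.1).getD "")
      st.1.items []).trans ?_
  rw [List.nil_append, h1, List.map_map]
  refine List.map_congr_left (fun p hp => ?_)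
  have hp' : (p.1, p.2) ∈ g.items := by simpa using hp
  have hget : g.get? p.1 = some p.2 := PySem.Dict.get?_of_mem_items g hp' hnd
  have h2get : st.2.get? p.1 = some (pvFmax p.2) := by
    rw [pv_get?_of_rel g st.2 pvFmax h2 p.1, hget]; rfl
  simp [Function.comp, h2get, pv_maxD_eq_fmax]
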